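-- pv_equiv track=rewrite | github.com/Lushios/adventofcode-2023 | 14/part2.py | find_new_boulder_location
-- ===== SOURCE A (Python) =====
-- def find_new_boulder_location(field, boulder_coords, direction):
--     boulder_has_arrived = False
--     while not boulder_has_arrived:
--         if (boulder_coords[0] + direction[0] < 0 or boulder_coords[0] + direction[0] > len(field[0]) - 1
--                 or boulder_coords[1] + direction[1] < 0 or boulder_coords[1] + direction[1] > len(field) - 1):
--             boulder_has_arrived = True
--         else:
--             new_coords = (boulder_coords[0] + direction[0], boulder_coords[1] + direction[1])
--             if field[new_coords[1]][new_coords[0]] == '.':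
--                 boulder_coords = new_coords
--             else:
--                 boulder_has_arrived = True
--     return boulder_coords
-- ===== SOURCE B (Python) =====
-- def find_new_boulder_location(field, boulder_coords, direction):
--     x0, y0 = boulder_coords
--     dx, dy = direction
--     w, h = len(field[0]), len(field)
--     # Stage 1: collect the in-bounds prefix of the ray positions (no cell reads).
--     ray = []
--     step = 1
--     while 0 <= x0 + dx * step < w and 0 <= y0 + dy * step < h:
--         ray.append((x0 + dx * step, y0 + dy * step))
--         step += 1
--     # Stage 2: length of the leading run of '.' cells along that ray.
--     k = 0
--     for x, y in ray:
--         if field[y][x] != '.':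
--             break
--         k += 1
--     # Closed-form final position from the step count.
--     return (x0 + dx * k, y0 + dy * k)
-- ===== Notes on version B (the rewrite author's own statement) =====
-- stated objective: alternative
-- what changed: B replaces A's mutable-coordinate walk with a stop flag by three stages: first materialise the in-bounds prefix of the ray positions (no cell reads), then count the leading run of '.' cells along it, then compute the final position in closed form as (x0+dx*k, y0+dy*k) from that count.
-- outside the precondition, e.g. on find_new_boulder_location([['#']], (0, 0), (0, 0)): A returns (0, 0), B does not finish within the time limit; on find_new_boulder_location([['.', '.'], ['#', '#'], []], (1, 0), (0, 1)): A returns (1, 0), B returns (1, 0)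
import Mathlib
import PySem

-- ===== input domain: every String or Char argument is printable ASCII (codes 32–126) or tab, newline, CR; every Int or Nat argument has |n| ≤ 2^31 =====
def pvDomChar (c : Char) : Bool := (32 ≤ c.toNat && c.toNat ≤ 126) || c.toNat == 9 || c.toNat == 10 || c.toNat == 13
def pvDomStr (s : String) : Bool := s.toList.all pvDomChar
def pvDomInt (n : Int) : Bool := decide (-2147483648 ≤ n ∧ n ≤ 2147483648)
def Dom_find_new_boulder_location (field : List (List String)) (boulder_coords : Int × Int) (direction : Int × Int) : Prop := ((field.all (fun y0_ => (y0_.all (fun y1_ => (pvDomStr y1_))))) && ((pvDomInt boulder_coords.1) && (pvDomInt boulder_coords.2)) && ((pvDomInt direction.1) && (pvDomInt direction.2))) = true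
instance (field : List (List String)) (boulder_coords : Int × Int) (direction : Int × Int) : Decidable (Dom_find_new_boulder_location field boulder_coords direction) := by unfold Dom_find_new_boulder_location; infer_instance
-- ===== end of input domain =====

-- B replaces A's mutable-coordinate walk by staged passes: build the in-bounds ray
-- positions, count the leading '.' run, and return the closed-form position; same cost.


-- ===== PORT A =====
-- field[0] (len(field[0]) in A; raises IndexError on empty field, excluded by Pre_)
def pvRow0A (field : List (List String)) : List String :=
  PySem.List.pyGetD field 0 []

-- field[y][x]; A only evaluates it with 0 ≤ y < len(field) and 0 ≤ x ≤ len(field[0])-1,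
-- so the "" default is reached only on ragged fields where Python raises (excluded by Pre_)
def pvCellA (field : List (List String)) (y x : Int) : String :=
  PySem.List.pyGetD (PySem.List.pyGetD field y []) x ""

-- A's while-loop, state = boulder_coords; the fuel only makes the loop total:
-- under Pre_ it never runs out (at most max(w,h) steps are taken)
def pvLoopA (field : List (List String)) (dx dy : Int) : Nat → Int × Int → Int × Int
  | 0, bc => bc
  | Nat.succ n, bc =>
    if bc.1 + dx < 0 ∨ bc.1 + dx > ((pvRow0A field).length : Int) - 1 ∨
       bc.2 + dy < 0 ∨ bc.2 + dy > (field.length : Int) - 1 then bc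
    else
      let nc := (bc.1 + dx, bc.2 + dy)
      if pvCellA field nc.2 nc.1 = "." then pvLoopA field dx dy n nc else bc

def find_new_boulder_location (field : List (List String)) (boulder_coords : Int × Int) (direction : Int × Int) : Int × Int :=
  pvLoopA field direction.1 direction.2 ((pvRow0A field).length + field.length + 1) boulder_coords

-- ===== PORT B =====
-- Stage 1 of Source B: the while-loop collecting the in-bounds prefix of the ray positions;
-- the fuel only makes the loop total (under Pre_ the walk leaves the grid within w+h steps)
def pvRayPosB (x0 y0 dx dy w h : Int) : Nat → Int → List (Int × Int)
  | 0, _ => []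
  | Nat.succ n, step =>
    let nx := x0 + dx * step
    let ny := y0 + dy * step
    if 0 ≤ nx ∧ nx < w ∧ 0 ≤ ny ∧ ny < h then
      (nx, ny) :: pvRayPosB x0 y0 dx dy w h n (step + 1)
    else []

-- Stage 2 of Source B: the for-loop with break counting the leading run of '.' cells
def pvDotRunB (field : List (List String)) : List (Int × Int) → Int
  | [] => 0
  | (x, y) :: rest =>
    if PySem.List.pyGetD (PySem.List.pyGetD field y []) x "" ≠ "." then 0
    else 1 + pvDotRunB field rest

def find_new_boulder_location_alt (field : List (List String)) (boulder_coords : Int × Int) (direction : Int × Int) : Int × Int :=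
  let w : Int := ((PySem.List.pyGetD field 0 []).length : Int)
  let h : Int := (field.length : Int)
  let ray := pvRayPosB boulder_coords.1 boulder_coords.2 direction.1 direction.2 w h
    ((PySem.List.pyGetD field 0 []).length + field.length + 1) 1
  let k := pvDotRunB field ray
  (boulder_coords.1 + direction.1 * k, boulder_coords.2 + direction.2 * k)

-- ===== PRECONDITION & SPEC =====
-- Pre_ excludes: the empty field and the ragged fields on which A's probe field[y][x] can
-- raise IndexError (some in-bounds ray position falls on a row shorter than row 0), and
-- direction (0,0), on which A loops forever whenever the boulder's own cell is '.'.
def Pre_find_new_boulder_location (field : List (List String)) (boulder_coords : Int × Int) (direction : Int × Int) : Prop :=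
  field ≠ [] ∧ direction ≠ (0, 0) ∧
  ∀ k ∈ List.range ((field.headD []).length + field.length + 1),
    (0 ≤ boulder_coords.1 + direction.1 * ((k : Int) + 1) →
     boulder_coords.1 + direction.1 * ((k : Int) + 1) ≤ ((field.headD []).length : Int) - 1 →
     0 ≤ boulder_coords.2 + direction.2 * ((k : Int) + 1) →
     boulder_coords.2 + direction.2 * ((k : Int) + 1) ≤ (field.length : Int) - 1 →
     boulder_coords.1 + direction.1 * ((k : Int) + 1) <
       ((PySem.List.pyGetD field (boulder_coords.2 + direction.2 * ((k : Int) + 1)) []).length : Int))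
instance (field : List (List String)) (boulder_coords : Int × Int) (direction : Int × Int) : Decidable (Pre_find_new_boulder_location field boulder_coords direction) := by unfold Pre_find_new_boulder_location; infer_instance

def pvWitness_find_new_boulder_location : List (List String) × (Int × Int) × (Int × Int) :=
  ([[".", "."], [".", "#"]], (0, 0), (1, 0))

def Spec_find_new_boulder_location (field : List (List String)) (boulder_coords : Int × Int) (direction : Int × Int) (out : Int × Int) : Prop := out = find_new_boulder_location_alt field boulder_coords direction
instance (field : List (List String)) (boulder_coords : Int × Int) (direction : Int × Int) (out : Int × Int) : Decidable (Spec_find_new_boulder_location field boulder_coords direction out) := by unfold Spec_find_new_boulder_location; infer_instance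

-- ===== CLAIM (what is proved, stated in full; the proofs are below) =====
def Claim_equal_find_new_boulder_location : Prop := ∀ (field : List (List String)) (boulder_coords : Int × Int) (direction : Int × Int), Dom_find_new_boulder_location field boulder_coords direction → Pre_find_new_boulder_location field boulder_coords direction → Spec_find_new_boulder_location field boulder_coords direction (find_new_boulder_location field boulder_coords direction)

-- ===== LEMMAS AND PROOFS =====

-- A after taking k steps sits at (x0+dx*k, y0+dy*k); with the same fuel, B's ray from
-- step k+1 has a '.'-run of length m and A advances exactly m more steps
lemma pvLoopA_eq_ray (field : List (List String)) (x0 y0 dx dy : Int)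
    (n : Nat) (k : Int) :
    pvLoopA field dx dy n (x0 + dx * k, y0 + dy * k) =
      (x0 + dx * (k + pvDotRunB field
          (pvRayPosB x0 y0 dx dy ((pvRow0A field).length : Int) (field.length : Int) n (k + 1))),
       y0 + dy * (k + pvDotRunB field
          (pvRayPosB x0 y0 dx dy ((pvRow0A field).length : Int) (field.length : Int) n (k + 1)))) := by
  induction n generalizing k with
  | zero => simp [pvLoopA, pvRayPosB, pvDotRunB]
  | succ n ih =>
    have hx : x0 + dx * k + dx = x0 + dx * (k + 1) := by ring
    have hy : y0 + dy * k + dy = y0 + dy * (k + 1) := by ring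
    simp only [pvLoopA, pvRayPosB]
    by_cases hb : x0 + dx * k + dx < 0 ∨
        x0 + dx * k + dx > ((pvRow0A field).length : Int) - 1 ∨
        y0 + dy * k + dy < 0 ∨ y0 + dy * k + dy > (field.length : Int) - 1
    · have hray : ¬ (0 ≤ x0 + dx * (k + 1) ∧ x0 + dx * (k + 1) < ((pvRow0A field).length : Int) ∧
          0 ≤ y0 + dy * (k + 1) ∧ y0 + dy * (k + 1) < (field.length : Int)) := by omega
      rw [if_pos hb, if_neg hray]
      simp [pvDotRunB]
    · have hray : 0 ≤ x0 + dx * (k + 1) ∧ x0 + dx * (k + 1) < ((pvRow0A field).length : Int) ∧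
          0 ≤ y0 + dy * (k + 1) ∧ y0 + dy * (k + 1) < (field.length : Int) := by omega
      rw [if_neg hb, if_pos hray]
      by_cases hc : pvCellA field (y0 + dy * k + dy) (x0 + dx * k + dx) = "."
      · have hcell : ¬ (PySem.List.pyGetD (PySem.List.pyGetD field (y0 + dy * (k + 1)) [])
            (x0 + dx * (k + 1)) "" ≠ ".") := by
          simp only [not_not]
          simpa [pvCellA, hx, hy] using hc
        rw [if_pos hc]
        simp only [pvDotRunB, if_neg hcell]
        rw [hx, hy, ih (k + 1)]
        simp only [Prod.mk.injEq]
        constructor <;> ring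
      · have hcell : PySem.List.pyGetD (PySem.List.pyGetD field (y0 + dy * (k + 1)) [])
            (x0 + dx * (k + 1)) "" ≠ "." := by
          simpa [pvCellA, hx, hy] using hc
        rw [if_neg hc]
        simp only [pvDotRunB, if_pos hcell]
        simp

-- ===== VERDICT (by name: the statement is the Claim_ definition above) =====
theorem find_new_boulder_location_spec : Claim_equal_find_new_boulder_location := by
  intro field bc dir _ _
  unfold Spec_find_new_boulder_location find_new_boulder_location find_new_boulder_location_alt
  have h := pvLoopA_eq_ray field bc.1 bc.2 dir.1 dir.2
      ((pvRow0A field).length + field.length + 1) 0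
  simp only [mul_zero, add_zero, zero_add] at h
  simpa [pvRow0A] using h
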